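-- pv_equiv track=rewrite | github.com/rabbitlss/im_detector | multi_ocr.py | _merge_close_lines
-- ===== SOURCE A (Python) =====
-- from typing import List, Tuple, Dict, Optional
--
-- def _merge_close_lines(ranges: List[Tuple[int, int]], threshold: int) -> List[Tuple[int, int]]:
--     """合并距离过近的行"""
--     if not ranges:
--         return ranges
--
--     merged = []
--     current_start, current_end = ranges[0]
--
--     for i in range(1, len(ranges)):
--         next_start, next_end = ranges[i]
--
--         if next_start - current_end <= threshold:
--             current_end = next_end
--         else:
--             merged.append((current_start, current_end))
--             current_start, current_end = next_start, next_end
--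
--     merged.append((current_start, current_end))
--     return merged
-- ===== SOURCE B (Python) =====
-- def _merge_close_lines(ranges, threshold):
--     if not ranges:
--         return ranges
--     # break mask: True where a new group begins (pure pairwise test; A's
--     # current_end always equals the previous range's end, so this is exact)
--     breaks = [b[0] - a[1] > threshold for a, b in zip(ranges, ranges[1:])]
--     starts = [ranges[0][0]] + [r[0] for r, brk in zip(ranges[1:], breaks) if brk]
--     ends = [r[1] for r, brk in zip(ranges, breaks) if brk] + [ranges[-1][1]]
--     return list(zip(starts, ends))
-- ===== Notes on version B (the rewrite author's own statement) =====
-- stated objective: alternative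
-- what changed: B drops A's stateful single-pass merge entirely: since A's running current_end is always just the previous range's end, B computes a pairwise boolean break mask with zip, collects group starts and group ends in two independent comprehensions, and zips them together.
import Mathlib
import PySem

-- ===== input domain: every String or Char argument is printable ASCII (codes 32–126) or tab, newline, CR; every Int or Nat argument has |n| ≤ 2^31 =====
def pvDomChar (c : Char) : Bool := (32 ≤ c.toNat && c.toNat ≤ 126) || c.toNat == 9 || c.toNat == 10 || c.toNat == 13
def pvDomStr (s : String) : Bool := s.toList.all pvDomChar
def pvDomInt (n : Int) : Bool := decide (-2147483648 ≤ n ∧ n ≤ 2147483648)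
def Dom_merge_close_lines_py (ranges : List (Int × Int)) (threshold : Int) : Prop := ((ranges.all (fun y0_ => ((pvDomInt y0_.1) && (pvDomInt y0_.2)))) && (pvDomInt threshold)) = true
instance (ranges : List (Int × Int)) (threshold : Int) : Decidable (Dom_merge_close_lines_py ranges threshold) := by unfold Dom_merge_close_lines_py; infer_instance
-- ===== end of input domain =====

-- B replaces A's stateful running merge with a pairwise break mask plus separate starts/ends collection zipped together (alternative, same cost).


-- ===== PORT A =====
-- loop body of A: state is (merged, current_start, current_end)
def mclA_step (threshold : Int) (acc : List (Int × Int) × Int × Int) (r : Int × Int) :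
    List (Int × Int) × Int × Int :=
  if r.1 - acc.2.2 ≤ threshold then (acc.1, acc.2.1, r.2)
  else (acc.1 ++ [(acc.2.1, acc.2.2)], r.1, r.2)

def merge_close_lines_py (ranges : List (Int × Int)) (threshold : Int) : List (Int × Int) :=
  match ranges with
  | [] => []
  | r0 :: _ =>
    let st := (PySem.List.pyRange 1 ranges.length 1).foldl
      (fun acc i => mclA_step threshold acc (PySem.List.pyGetD ranges i (0, 0)))
      ([], r0.1, r0.2)
    st.1 ++ [(st.2.1, st.2.2)]

-- ===== PORT B =====
-- break mask: [b[0] - a[1] > threshold for a, b in zip(ranges, ranges[1:])]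
def mclB_breaks (threshold : Int) (l : List (Int × Int)) : List Bool :=
  (l.zip l.tail).map (fun p => decide (p.2.1 - p.1.2 > threshold))

def merge_close_lines_py_alt (ranges : List (Int × Int)) (threshold : Int) : List (Int × Int) :=
  match ranges with
  | [] => []
  | r0 :: rest =>
    let breaks := mclB_breaks threshold (r0 :: rest)
    let starts := r0.1 :: (rest.zip breaks).filterMap (fun p => if p.2 then some p.1.1 else none)
    let ends := ((r0 :: rest).zip breaks).filterMap (fun p => if p.2 then some p.1.2 else none)
                ++ [((r0 :: rest).getLastD (0, 0)).2]
    starts.zip ends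

-- ===== PRECONDITION & SPEC =====
def Spec_merge_close_lines_py (ranges : List (Int × Int)) (threshold : Int) (out : List (Int × Int)) : Prop := out = merge_close_lines_py_alt ranges threshold
instance (ranges : List (Int × Int)) (threshold : Int) (out : List (Int × Int)) : Decidable (Spec_merge_close_lines_py ranges threshold out) := by unfold Spec_merge_close_lines_py; infer_instance

-- ===== CLAIM =====
def Claim_equal_merge_close_lines_py : Prop := ∀ (ranges : List (Int × Int)) (threshold : Int), Dom_merge_close_lines_py ranges threshold → Spec_merge_close_lines_py ranges threshold (merge_close_lines_py ranges threshold)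

-- ===== LEMMAS AND PROOFS =====

-- common recursive characterisation: merge with current state (s, e)
def mclRec (t : Int) (s e : Int) : List (Int × Int) → List (Int × Int)
  | [] => [(s, e)]
  | r :: rs => if r.1 - e ≤ t then mclRec t s r.2 rs else (s, e) :: mclRec t r.1 r.2 rs

-- A's fold equals mclRec
theorem mclA_fold_eq (t : Int) : ∀ (rest : List (Int × Int)) (merged : List (Int × Int)) (s e : Int),
    (let st := rest.foldl (fun acc r => mclA_step t acc r) (merged, s, e);
     st.1 ++ [(st.2.1, st.2.2)]) = merged ++ mclRec t s e rest := by
  intro rest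
  induction rest with
  | nil => intro merged s e; simp [mclRec]
  | cons r rs ih =>
    intro merged s e
    simp only [List.foldl_cons, mclRec]
    by_cases hc : r.1 - e ≤ t
    · rw [if_pos hc]
      have h1 : mclA_step t (merged, s, e) r = (merged, s, r.2) := by
        simp [mclA_step, hc]
      rw [h1]
      exact ih merged s r.2
    · rw [if_neg hc]
      have h1 : mclA_step t (merged, s, e) r = (merged ++ [(s, e)], r.1, r.2) := by
        simp [mclA_step, hc]
      rw [h1, ih (merged ++ [(s, e)]) r.1 r.2]
      simp

-- B's zip construction equals mclRec (start generalized to s, previous range cur)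
theorem mclB_eq (t : Int) : ∀ (rest : List (Int × Int)) (cur : Int × Int) (s : Int),
    (s :: (rest.zip (mclB_breaks t (cur :: rest))).filterMap
        (fun p => if p.2 then some p.1.1 else none)).zip
      (((cur :: rest).zip (mclB_breaks t (cur :: rest))).filterMap
        (fun p => if p.2 then some p.1.2 else none)
       ++ [((cur :: rest).getLastD (0, 0)).2])
    = mclRec t s cur.2 rest := by
  intro rest
  induction rest with
  | nil => intro cur s; simp [mclB_breaks, mclRec]
  | cons r rs ih =>
    intro cur s
    have hbr : mclB_breaks t (cur :: r :: rs)
        = decide (r.1 - cur.2 > t) :: mclB_breaks t (r :: rs) := by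
      simp [mclB_breaks]
    have h := ih r s
    simp only [List.getLastD_cons] at h
    by_cases hc : r.1 - cur.2 ≤ t
    · have hb : decide (r.1 - cur.2 > t) = false := by simp; omega
      simp only [hbr, hb, List.zip_cons_cons, List.filterMap_cons, List.getLastD_cons,
        mclRec]
      rw [if_pos hc]
      simpa using h
    · have hb : decide (r.1 - cur.2 > t) = true := by simp; omega
      have h2 := ih r r.1
      simp only [List.getLastD_cons] at h2
      simp only [hbr, hb, List.zip_cons_cons, List.filterMap_cons, List.getLastD_cons,
        mclRec]
      rw [if_neg hc]
      simpa using h2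

-- ===== VERDICT =====
theorem merge_close_lines_py_spec : Claim_equal_merge_close_lines_py := by
  intro ranges threshold _
  unfold Spec_merge_close_lines_py merge_close_lines_py merge_close_lines_py_alt
  cases ranges with
  | nil => rfl
  | cons r0 rest =>
    have hbr : (PySem.List.pyRange 1 (r0 :: rest).length 1).foldl
        (fun acc i => mclA_step threshold acc (PySem.List.pyGetD (r0 :: rest) i (0, 0)))
        ([], r0.1, r0.2)
      = ((r0 :: rest).drop 1).foldl (fun acc r => mclA_step threshold acc r) ([], r0.1, r0.2) := by
      have := PySem.List.foldl_pyRange_pyGetD (a := (1 : Int)) (xs := r0 :: rest) (d := ((0, 0) : Int × Int))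
        (f := fun acc r => mclA_step threshold acc r) (init := (([], r0.1, r0.2) : List (Int × Int) × Int × Int))
        (by norm_num)
      simpa using this
    simp only [hbr, List.drop_one, List.tail_cons]
    rw [show (rest.foldl (fun acc r => mclA_step threshold acc r) ([], r0.1, r0.2)).1
          ++ [((rest.foldl (fun acc r => mclA_step threshold acc r) ([], r0.1, r0.2)).2.1,
              (rest.foldl (fun acc r => mclA_step threshold acc r) ([], r0.1, r0.2)).2.2)]
        = [] ++ mclRec threshold r0.1 r0.2 rest from mclA_fold_eq threshold rest [] r0.1 r0.2]
    rw [← mclB_eq threshold rest r0 r0.1]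
    simp
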